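-- pv_equiv track=rewrite | github.com/Kotlas23412/proxy-checker | lib/filter_mtproto_by_country.py | _line_passes
-- ===== SOURCE A (Python) =====
-- def _line_passes(
--     host: str,
--     location: str,
--     host_to_ips: dict[str, list[str]],
--     geo_cache: dict[str, str],
-- ) -> bool:
--     """
--     Решение по строке после MMDB+HTTP: как filter_configs - any(ip)==location;
--     если по всем IPv4 кода нет (ошибка/пусто), допускаем legacy-кэш только по host
--     (старые geoip_cache_mtproto.json без ключей по IP).
--     """
--     ips = host_to_ips.get(host, [])
--     if ips:
--         for ip in ips:
--             if (geo_cache.get(ip) or "").strip() == location: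
--                 return True
--         for ip in ips:
--             cc = (geo_cache.get(ip) or "").strip()
--             if cc:
--                 return False
--         return (geo_cache.get(host) or "").strip() == location
--     return (geo_cache.get(host) or "").strip() == location
-- ===== SOURCE B (Python) =====
-- def _line_passes(
--     host: str,
--     location: str,
--     host_to_ips: dict[str, list[str]],
--     geo_cache: dict[str, str],
-- ) -> bool:
--     # Single pass: return True on the first matching country code; remember
--     # whether any non-empty code was seen; fall back to the host's own code.
--     seen = False
--     for ip in host_to_ips.get(host, []):
--         cc = (geo_cache.get(ip) or "").strip()
--         if cc == location:
--             return True
--         if cc: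
--             seen = True
--     if seen:
--         return False
--     return (geo_cache.get(host) or "").strip() == location
-- ===== Notes on version B (the rewrite author's own statement) =====
-- stated objective: simpler
-- what changed: Replaces A's empty-ips branch plus two sequential scans (match scan, then non-empty-code scan) with one fused pass over the ips keeping a single 'seen a code' boolean, sharing the host fallback.
import Mathlib
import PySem

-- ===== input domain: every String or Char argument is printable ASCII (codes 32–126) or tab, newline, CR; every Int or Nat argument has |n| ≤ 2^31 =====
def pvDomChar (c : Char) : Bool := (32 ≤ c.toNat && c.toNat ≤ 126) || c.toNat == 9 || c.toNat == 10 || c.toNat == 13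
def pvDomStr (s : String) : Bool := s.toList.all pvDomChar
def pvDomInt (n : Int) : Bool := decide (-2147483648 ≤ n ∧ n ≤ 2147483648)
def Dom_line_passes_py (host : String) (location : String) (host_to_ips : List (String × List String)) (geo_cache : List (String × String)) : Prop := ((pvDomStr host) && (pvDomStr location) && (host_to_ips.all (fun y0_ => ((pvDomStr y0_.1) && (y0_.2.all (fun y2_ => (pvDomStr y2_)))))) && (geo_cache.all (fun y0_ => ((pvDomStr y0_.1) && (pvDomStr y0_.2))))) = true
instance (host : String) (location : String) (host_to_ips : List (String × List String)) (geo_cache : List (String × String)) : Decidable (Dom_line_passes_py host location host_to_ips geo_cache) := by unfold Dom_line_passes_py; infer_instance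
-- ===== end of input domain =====

-- B fuses A's two sequential scans (plus the separate empty-ips branch) into one pass with a
-- 'seen a code' boolean; objective: simpler. Return value only (neither version mutates arguments).

-- ===== PORT A =====
-- (geo_cache.get(k) or "").strip(): a missing key and a stored "" both yield "" before strip
def pvCC (geo_cache : List (String × String)) (k : String) : String :=
  PySem.Str.strip ((PySem.Dict.mk geo_cache).getD k "")

-- first loop of A: 'for ip in ips: if cc == location: return True'
def pvA_loop1 (location : String) (geo_cache : List (String × String)) : List String → Bool
  | [] => false
  | ip :: rest =>
      if pvCC geo_cache ip == location then true else pvA_loop1 location geo_cache rest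

-- second loop of A: 'for ip in ips: if cc: return False' (true = some non-empty code seen)
def pvA_loop2 (geo_cache : List (String × String)) : List String → Bool
  | [] => false
  | ip :: rest =>
      if pvCC geo_cache ip != "" then true else pvA_loop2 geo_cache rest

def line_passes_py (host : String) (location : String) (host_to_ips : List (String × List String)) (geo_cache : List (String × String)) : Bool :=
  let ips := (PySem.Dict.mk host_to_ips).getD host []
  if !ips.isEmpty then
    if pvA_loop1 location geo_cache ips then true
    else if pvA_loop2 geo_cache ips then false
    else pvCC geo_cache host == location
  else pvCC geo_cache host == location

-- ===== PORT B =====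
-- (B computes (geo_cache.get(k) or "").strip() identically, so it reuses the helper pvCC)
-- B's single loop carrying the 'seen' accumulator; after the loop: seen → False, else host fallback
def pvB_loop (location : String) (geo_cache : List (String × String)) (hostcc : Bool) : List String → Bool → Bool
  | [], seen => if seen then false else hostcc
  | ip :: rest, seen =>
      let cc := pvCC geo_cache ip
      if cc == location then true
      else pvB_loop location geo_cache hostcc rest (if cc != "" then true else seen)

def line_passes_py_alt (host : String) (location : String) (host_to_ips : List (String × List String)) (geo_cache : List (String × String)) : Bool :=
  pvB_loop location geo_cache (pvCC geo_cache host == location)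
    ((PySem.Dict.mk host_to_ips).getD host []) false

-- ===== PRECONDITION & SPEC =====
def Spec_line_passes_py (host : String) (location : String) (host_to_ips : List (String × List String)) (geo_cache : List (String × String)) (out : Bool) : Prop := out = line_passes_py_alt host location host_to_ips geo_cache
instance (host : String) (location : String) (host_to_ips : List (String × List String)) (geo_cache : List (String × String)) (out : Bool) : Decidable (Spec_line_passes_py host location host_to_ips geo_cache out) := by unfold Spec_line_passes_py; infer_instance

-- ===== CLAIM (what is proved, stated in full; the proofs are below) =====
def Claim_equal_line_passes_py : Prop := ∀ (host : String) (location : String) (host_to_ips : List (String × List String)) (geo_cache : List (String × String)), Dom_line_passes_py host location host_to_ips geo_cache → Spec_line_passes_py host location host_to_ips geo_cache (line_passes_py host location host_to_ips geo_cache)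

-- ===== LEMMAS AND PROOFS =====
theorem pvB_loop_eq (location : String) (geo_cache : List (String × String)) (hostcc : Bool)
    (ips : List String) (seen : Bool) :
    pvB_loop location geo_cache hostcc ips seen =
      (if pvA_loop1 location geo_cache ips then true
       else if seen || pvA_loop2 geo_cache ips then false
       else hostcc) := by
  induction ips generalizing seen with
  | nil => simp [pvB_loop, pvA_loop1, pvA_loop2]
  | cons ip rest ih =>
      simp only [pvB_loop, pvA_loop1, pvA_loop2, pvCC, pvCC]
      by_cases h : PySem.Str.strip ((PySem.Dict.mk geo_cache).getD ip "") = location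
      · simp [h]
      · by_cases h2 : PySem.Str.strip ((PySem.Dict.mk geo_cache).getD ip "") = ""
        · have h3 : location ≠ "" := fun e => h (h2.trans e.symm)
          simp [h2, h3, ih]
        · simp [h, h2, ih]

-- ===== VERDICT (by name: the statement is the Claim_ definition above) =====
theorem line_passes_py_spec : Claim_equal_line_passes_py := by
  intro host location host_to_ips geo_cache _
  show line_passes_py host location host_to_ips geo_cache = _
  unfold line_passes_py line_passes_py_alt
  rw [pvB_loop_eq]
  cases hips : (PySem.Dict.mk host_to_ips).getD host [] with
  | nil => simp [pvA_loop1, pvA_loop2, pvCC, pvCC]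
  | cons ip rest => simp [pvCC, pvCC]
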